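-- pv_equiv track=rewrite | github.com/mindspore-ai/akg | akg_agents/python/akg_agents/cli/runtime/common_patch.py | _iter_codex_blocks
-- ===== SOURCE A (Python) =====
-- def _collect_block_lines(lines: list[str], idx: int) -> tuple[list[str], int]:
--     block: list[str] = []
--     while idx < len(lines) and not lines[idx].startswith("*** "):
--         block.append(lines[idx])
--         idx += 1
--     return block, idx
--
-- def _parse_codex_header(line: str) -> tuple[str, str] | None:
--     if line.startswith("*** Update File: "):
--         return ("update", line[len("*** Update File: ") :].strip())
--     if line.startswith("*** Add File: "):
--         return ("add", line[len("*** Add File: ") :].strip())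
--     if line.startswith("*** Delete File: "):
--         return ("delete", line[len("*** Delete File: ") :].strip())
--     if line.startswith("*** End Patch"):
--         return ("end", "")
--     return None
--
-- def _iter_codex_blocks(lines: list[str]):
--     idx = 1
--     while idx < len(lines):
--         header = _parse_codex_header(lines[idx])
--         if not header:
--             idx += 1
--             continue
--         kind, file_path = header
--         if kind == "end":
--             break
--         idx += 1
--         block_lines, idx = _collect_block_lines(lines, idx)
--         yield kind, file_path, block_lines
-- ===== SOURCE B (Python) =====
-- _PREFIXES = (
--     ("*** Update File: ", "update"),
--     ("*** Add File: ", "add"),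
--     ("*** Delete File: ", "delete"),
-- )
--
-- def _parse_header(line):
--     for pre, kind in _PREFIXES:
--         if line.startswith(pre):
--             return (kind, line[len(pre):].strip())
--     if line.startswith("*** End Patch"):
--         return ("end", "")
--     return None
--
-- def _iter_codex_blocks(lines):
--     # Single-pass state machine over lines[1:]: a pending (kind, path, block)
--     # is flushed whenever a '*** ' line is met; non-'*** ' lines feed the block.
--     pending = None
--     for line in lines[1:]:
--         if line.startswith("*** "):
--             if pending is not None:
--                 yield pending
--                 pending = None
--             header = _parse_header(line)
--             if header is not None:
--                 kind, file_path = header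
--                 if kind == "end":
--                     return
--                 pending = (kind, file_path, [])
--         elif pending is not None:
--             pending[2].append(line)
--     if pending is not None:
--         yield pending
-- ===== Notes on version B (the rewrite author's own statement) =====
-- stated objective: alternative
-- what changed: Replaced the index-based while loop with an inner _collect_block_lines scanning loop by a single forward pass over lines[1:] that keeps one pending (kind, path, block) tuple, flushing it at each '*** ' line; the inner loop, index arithmetic and per-line re-parsing of non-header lines disappear.
import Mathlib
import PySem

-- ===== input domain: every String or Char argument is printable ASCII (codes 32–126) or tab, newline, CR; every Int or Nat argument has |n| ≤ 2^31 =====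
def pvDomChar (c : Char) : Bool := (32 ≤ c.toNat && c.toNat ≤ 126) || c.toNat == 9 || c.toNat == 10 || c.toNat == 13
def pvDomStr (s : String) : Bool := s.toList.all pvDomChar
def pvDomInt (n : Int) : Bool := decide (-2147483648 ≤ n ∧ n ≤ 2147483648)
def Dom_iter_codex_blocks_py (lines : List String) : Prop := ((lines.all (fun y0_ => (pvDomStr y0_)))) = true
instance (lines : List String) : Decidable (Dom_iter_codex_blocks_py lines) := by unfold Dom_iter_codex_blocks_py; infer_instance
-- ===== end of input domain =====

-- B replaces A's index-based while loop with an inner _collect_block_lines scanning loop by a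
-- single-pass state machine over lines.drop 1 holding one pending block (alternative decomposition, same cost).

-- ===== PORT A =====
def parse_codex_header (line : String) : Option (String × String) :=
  if PySem.Str.startswith line "*** Update File: " then
    some ("update", PySem.Str.strip (PySem.Str.slice line (some (PySem.Str.len "*** Update File: ")) none))
  else if PySem.Str.startswith line "*** Add File: " then
    some ("add", PySem.Str.strip (PySem.Str.slice line (some (PySem.Str.len "*** Add File: ")) none))
  else if PySem.Str.startswith line "*** Delete File: " then
    some ("delete", PySem.Str.strip (PySem.Str.slice line (some (PySem.Str.len "*** Delete File: ")) none))
  else if PySem.Str.startswith line "*** End Patch" then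
    some ("end", "")
  else none

def collect_block_lines (lines : List String) (idx : Nat) : List String × Nat :=
  if _h : idx < lines.length then
    if PySem.Str.startswith lines[idx]! "*** " then ([], idx)
    else
      let r := collect_block_lines lines (idx + 1)
      (lines[idx]! :: r.1, r.2)
  else ([], idx)
termination_by lines.length - idx

-- cited by iter_loop's decreasing_by: the inner scan never moves the index backwards
theorem collect_snd_ge (lines : List String) (idx : Nat) :
    idx ≤ (collect_block_lines lines idx).2 := by
  fun_induction collect_block_lines with
  | case1 => simp
  | case2 i hlt hs r ih => exact le_trans (Nat.le_succ _) ih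
  | case3 => simp

def iter_loop (lines : List String) (idx : Nat) : List (String × String × List String) :=
  if _h : idx < lines.length then
    match parse_codex_header (lines[idx]!) with
    | none => iter_loop lines (idx + 1)
    | some (kind, file_path) =>
      if kind == "end" then []
      else
        let r := collect_block_lines lines (idx + 1)
        (kind, file_path, r.1) :: iter_loop lines r.2
  else []
termination_by lines.length - idx
decreasing_by
  · omega
  · have := collect_snd_ge lines (idx + 1); omega

def iter_codex_blocks_py (lines : List String) : List (String × String × List String) :=
  iter_loop lines 1

-- ===== PORT B =====
def header_prefixes : List (String × String) :=
  [("*** Update File: ", "update"), ("*** Add File: ", "add"), ("*** Delete File: ", "delete")]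

def parse_header_alt (line : String) : Option (String × String) :=
  match header_prefixes.findSome? (fun pk =>
      if PySem.Str.startswith line pk.1 then
        some (pk.2, PySem.Str.strip (PySem.Str.slice line (some (PySem.Str.len pk.1)) none))
      else none) with
  | some h => some h
  | none =>
    if PySem.Str.startswith line "*** End Patch" then some ("end", "") else none

def flushPending (p : Option (String × String × List String)) : List (String × String × List String) :=
  match p with
  | some b => [b]
  | none => []

def iter_loop_alt (pending : Option (String × String × List String)) :
    List String → List (String × String × List String)
  | [] => flushPending pending
  | line :: rest =>
    if PySem.Str.startswith line "*** " then
      match parse_header_alt line with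
      | some (k, fp) =>
        if k == "end" then flushPending pending
        else flushPending pending ++ iter_loop_alt (some (k, fp, [])) rest
      | none => flushPending pending ++ iter_loop_alt none rest
    else
      match pending with
      | some (k, fp, b) => iter_loop_alt (some (k, fp, b ++ [line])) rest
      | none => iter_loop_alt none rest

def iter_codex_blocks_py_alt (lines : List String) : List (String × String × List String) :=
  iter_loop_alt none (lines.drop 1)

-- ===== PRECONDITION & SPEC =====
def Spec_iter_codex_blocks_py (lines : List String) (out : List (String × String × List String)) : Prop := out = iter_codex_blocks_py_alt lines
instance (lines : List String) (out : List (String × String × List String)) : Decidable (Spec_iter_codex_blocks_py lines out) := by unfold Spec_iter_codex_blocks_py; infer_instance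

-- ===== CLAIM (what is proved, stated in full; the proofs are below) =====
def Claim_equal_iter_codex_blocks_py : Prop := ∀ (lines : List String), Dom_iter_codex_blocks_py lines → Spec_iter_codex_blocks_py lines (iter_codex_blocks_py lines)

-- ===== LEMMAS AND PROOFS =====

theorem parse_eq (line : String) : parse_header_alt line = parse_codex_header line := by
  simp only [parse_header_alt, parse_codex_header, header_prefixes, List.findSome?]
  split_ifs <;> simp_all

theorem startswith_mono (line p q : String) (hpq : q.toList <+: p.toList)
    (h : PySem.Str.startswith line p = true) : PySem.Str.startswith line q = true := by
  have := (PySem.Chars.startswith_iff line.toList p.toList).mp (by simpa using h)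
  simpa using (PySem.Chars.startswith_iff line.toList q.toList).mpr (hpq.trans this)

theorem header_star (line : String) (h : parse_codex_header line ≠ none) :
    PySem.Str.startswith line "*** " = true := by
  unfold parse_codex_header at h
  split_ifs at h with h1 h2 h3 h4
  · exact startswith_mono line _ _ (by decide) h1
  · exact startswith_mono line _ _ (by decide) h2
  · exact startswith_mono line _ _ (by decide) h3
  · exact startswith_mono line _ _ (by decide) h4
  · simp at h

theorem main_invariant (lines : List String) (idx : Nat) :
    iter_loop lines idx = iter_loop_alt none (lines.drop idx) ∧
    ∀ k fp acc,
      (k, fp, acc ++ (collect_block_lines lines idx).1) :: iter_loop lines (collect_block_lines lines idx).2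
        = iter_loop_alt (some (k, fp, acc)) (lines.drop idx) := by
  induction hm : lines.length - idx using Nat.strong_induction_on generalizing idx with
  | _ n ih =>
  by_cases hlt : idx < lines.length
  · have hdrop : lines.drop idx = lines[idx] :: lines.drop (idx + 1) :=
      List.drop_eq_getElem_cons hlt
    have ihd := ih (lines.length - (idx + 1)) (by omega) (idx + 1) rfl
    by_cases hs : PySem.Str.startswith lines[idx] "*** " = true
    · have hsC := hs
      simp at hsC
      have hcol : collect_block_lines lines idx = ([], idx) := by
        rw [collect_block_lines]; simp [hlt, hsC]
      rcases hp : parse_codex_header lines[idx] with _ | ⟨kd, fpd⟩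
      · -- unrecognized '*** ' line: A skips it; B flushes any pending block and stays idle
        have hA : iter_loop lines idx = iter_loop lines (idx + 1) := by
          rw [iter_loop]; simp [hlt, hp]
        constructor
        · rw [hA, hdrop, ihd.1]
          simp [iter_loop_alt, hsC, parse_eq, hp, flushPending]
        · intro k fp acc
          rw [hcol, hA, hdrop, ihd.1]
          simp [iter_loop_alt, hsC, parse_eq, hp, flushPending]
      · by_cases hend : kd = "end"
        · have hA : iter_loop lines idx = [] := by
            rw [iter_loop]; simp [hlt, hp, hend]
          constructor
          · rw [hA, hdrop]
            simp [iter_loop_alt, hsC, parse_eq, hp, hend, flushPending]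
          · intro k fp acc
            rw [hcol, hA, hdrop]
            simp [iter_loop_alt, hsC, parse_eq, hp, hend, flushPending]
        · have hA : iter_loop lines idx =
              (kd, fpd, (collect_block_lines lines (idx + 1)).1) ::
                iter_loop lines (collect_block_lines lines (idx + 1)).2 := by
            rw [iter_loop]; simp [hlt, hp, hend]
          have htail := ihd.2 kd fpd []
          simp only [List.nil_append] at htail
          constructor
          · rw [hA, htail, hdrop]
            simp [iter_loop_alt, hsC, parse_eq, hp, hend, flushPending]
          · intro k fp acc
            rw [hcol, hA, htail, hdrop]
            simp [iter_loop_alt, hsC, parse_eq, hp, hend, flushPending]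
    · -- plain line: A's outer loop skips it (no header) or the inner collect loop absorbs it
      have hp : parse_codex_header lines[idx] = none := by
        by_contra hne
        exact hs (header_star _ hne)
      have hsC := hs
      simp at hsC
      have hcol : collect_block_lines lines idx =
          ((lines[idx] :: (collect_block_lines lines (idx + 1)).1),
            (collect_block_lines lines (idx + 1)).2) := by
        rw [collect_block_lines]; simp [hlt, hsC]
      have hA : iter_loop lines idx = iter_loop lines (idx + 1) := by
        rw [iter_loop]; simp [hlt, hp]
      constructor
      · rw [hA, hdrop, ihd.1]
        simp [iter_loop_alt, hsC]
      · intro k fp acc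
        rw [hcol, hdrop]
        have hstep := ihd.2 k fp (acc ++ [lines[idx]])
        simp only [iter_loop_alt]
        simp [hsC]
        rw [← hstep]
        simp
  · have hdrop : lines.drop idx = [] := List.drop_eq_nil_of_le (by omega)
    have hA : iter_loop lines idx = [] := by rw [iter_loop]; simp [hlt]
    have hcol : collect_block_lines lines idx = ([], idx) := by
      rw [collect_block_lines]; simp [hlt]
    refine ⟨by rw [hA, hdrop]; rfl, ?_⟩
    intro k fp acc
    rw [hcol, hA, hdrop]
    simp [iter_loop_alt, flushPending]

-- ===== VERDICT (by name: the statement is the Claim_ definition above) =====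
theorem iter_codex_blocks_py_spec : Claim_equal_iter_codex_blocks_py := by
  intro lines _
  unfold Spec_iter_codex_blocks_py iter_codex_blocks_py iter_codex_blocks_py_alt
  exact (main_invariant lines 1).1
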